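-- pv_equiv track=rewrite | github.com/tianxuansun/study-group-matcher | app/services/matching.py | _find_common_slot
-- ===== SOURCE A (Python) =====
-- from typing import Dict, List, Tuple, Optional
--
-- def _find_common_slot(day_intervals: List[List[Tuple[int,int]]], min_len: int) -> Optional[Tuple[int,int]]:
--     """
--     day_intervals: list of interval lists for each member on same weekday.
--     Greedy intersection sweep to find one interval of length >= min_len.
--     """
--     # flatten approach: start with intersection = first person's list
--     inter: List[Tuple[int,int]] = day_intervals[0][:]
--     for nxt in day_intervals[1:]:
--         new_inter: List[Tuple[int,int]] = []
--         i=j=0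
--         while i < len(inter) and j < len(nxt):
--             a = inter[i]; b = nxt[j]
--             start = max(a[0], b[0]); end = min(a[1], b[1])
--             if end > start:
--                 new_inter.append((start, end))
--             if a[1] < b[1]: i += 1
--             else: j += 1
--         inter = new_inter
--         if not inter:
--             return None
--     for s,e in inter:
--         if e - s >= min_len:
--             return (s, s + min_len)  # pick earliest feasible window of min_len
--     return None
-- ===== SOURCE B (Python) =====
-- def _intersect(xs, ys):
--     """Intersect two interval lists by consuming list heads (no index bookkeeping)."""
--     out = []
--     while xs and ys:
--         (a_lo, a_hi), (b_lo, b_hi) = xs[0], ys[0]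
--         lo = max(a_lo, b_lo)
--         hi = min(a_hi, b_hi)
--         if hi > lo:
--             out.append((lo, hi))
--         if a_hi < b_hi:
--             xs = xs[1:]
--         else:
--             ys = ys[1:]
--     return out
--
--
-- def _find_common_slot(day_intervals, min_len):
--     common = day_intervals[0]
--     for nxt in day_intervals[1:]:
--         common = _intersect(common, nxt)
--     return next(((lo, lo + min_len) for lo, hi in common if hi - lo >= min_len), None)
-- ===== Notes on version B (the rewrite author's own statement) =====
-- stated objective: simpler
-- what changed: The index-juggling two-pointer while loop becomes a head-consuming _intersect helper folded over the members (the early 'return None on empty intersection' disappears since an empty list is absorbing), and the final scan becomes next() over a generator.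
import Mathlib
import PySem

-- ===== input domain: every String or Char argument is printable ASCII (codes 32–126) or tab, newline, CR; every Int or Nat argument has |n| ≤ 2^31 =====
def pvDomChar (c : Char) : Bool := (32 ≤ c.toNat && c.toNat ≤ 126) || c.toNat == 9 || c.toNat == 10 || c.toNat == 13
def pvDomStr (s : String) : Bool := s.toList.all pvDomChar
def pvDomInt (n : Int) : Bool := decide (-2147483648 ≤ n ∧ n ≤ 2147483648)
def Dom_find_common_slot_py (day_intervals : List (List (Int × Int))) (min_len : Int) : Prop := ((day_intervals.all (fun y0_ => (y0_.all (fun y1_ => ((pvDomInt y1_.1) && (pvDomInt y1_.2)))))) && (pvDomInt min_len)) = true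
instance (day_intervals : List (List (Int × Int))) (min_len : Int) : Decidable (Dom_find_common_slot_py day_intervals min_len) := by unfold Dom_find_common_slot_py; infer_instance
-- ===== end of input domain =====

-- B replaces A's index-based two-pointer merge and early return by a head-consuming
-- intersection helper folded over the members and a find-first selection (objective: simpler).


-- ===== PORT A =====
-- inner while loop: i, j indices into the fixed lists, new_inter accumulated by append
def pvA_interLoop (inter nxt : List (Int × Int)) (i j : Nat) (acc : List (Int × Int)) :
    List (Int × Int) :=
  if h : i < inter.length ∧ j < nxt.length then
    let a := inter[i]'h.1
    let b := nxt[j]'h.2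
    let start := max a.1 b.1
    let stop := min a.2 b.2
    let acc' := if stop > start then acc ++ [(start, stop)] else acc
    if a.2 < b.2 then pvA_interLoop inter nxt (i + 1) j acc'
    else pvA_interLoop inter nxt i (j + 1) acc'
  else acc
termination_by (inter.length - i) + (nxt.length - j)
decreasing_by all_goals omega

-- outer for loop with the early 'return None' when the intersection becomes empty
def pvA_outer (inter : List (Int × Int)) : List (List (Int × Int)) → Option (List (Int × Int))
  | [] => some inter
  | nxt :: rest =>
      let newInter := pvA_interLoop inter nxt 0 0 []
      if newInter = [] then none else pvA_outer newInter rest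

-- final 'for s,e in inter: if e - s >= min_len: return (s, s + min_len)'
def pvA_pick (min_len : Int) : List (Int × Int) → Option (Int × Int)
  | [] => none
  | (s, e) :: t => if e - s ≥ min_len then some (s, s + min_len) else pvA_pick min_len t

def find_common_slot_py (day_intervals : List (List (Int × Int))) (min_len : Int) :
    Option (Int × Int) :=
  match day_intervals with
  | [] => none  -- day_intervals[0] raises IndexError in Python; excluded by Pre_
  | first :: rest =>
      match pvA_outer first rest with
      | none => none
      | some inter => pvA_pick min_len inter

-- ===== PORT B =====
-- _intersect: consume whole list heads (xs = xs[1:]) instead of moving indices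
def pvB_intersect : List (Int × Int) → List (Int × Int) → List (Int × Int) → List (Int × Int)
  | (a_lo, a_hi) :: xs', (b_lo, b_hi) :: ys', out =>
      let lo := max a_lo b_lo
      let hi := min a_hi b_hi
      let out' := if hi > lo then out ++ [(lo, hi)] else out
      if a_hi < b_hi then pvB_intersect xs' ((b_lo, b_hi) :: ys') out'
      else pvB_intersect ((a_lo, a_hi) :: xs') ys' out'
  | _, _, out => out

def find_common_slot_py_alt (day_intervals : List (List (Int × Int))) (min_len : Int) :
    Option (Int × Int) :=
  match day_intervals with
  | [] => none  -- day_intervals[0] raises IndexError in Python; excluded by Pre_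
  | first :: rest =>
      let common := rest.foldl (fun acc nxt => pvB_intersect acc nxt []) first
      -- next(((lo, lo + min_len) for lo, hi in common if hi - lo >= min_len), None)
      (common.find? (fun p => p.2 - p.1 ≥ min_len)).map (fun p => (p.1, p.1 + min_len))

-- ===== PRECONDITION & SPEC =====
-- Pre_ excludes only the empty member list, on which the Python A raises IndexError.
def Pre_find_common_slot_py (day_intervals : List (List (Int × Int))) (min_len : Int) : Prop :=
  day_intervals ≠ []
instance (day_intervals : List (List (Int × Int))) (min_len : Int) :
    Decidable (Pre_find_common_slot_py day_intervals min_len) := by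
  unfold Pre_find_common_slot_py; infer_instance

def pvWitness_find_common_slot_py : (List (List (Int × Int))) × Int := ([[(0, 3)], [(1, 5)]], 2)

def Spec_find_common_slot_py (day_intervals : List (List (Int × Int))) (min_len : Int) (out : Option (Int × Int)) : Prop := out = find_common_slot_py_alt day_intervals min_len
instance (day_intervals : List (List (Int × Int))) (min_len : Int) (out : Option (Int × Int)) : Decidable (Spec_find_common_slot_py day_intervals min_len out) := by unfold Spec_find_common_slot_py; infer_instance

-- ===== CLAIM (what is proved, stated in full; the proofs are below) =====
def Claim_equal_find_common_slot_py : Prop := ∀ (day_intervals : List (List (Int × Int))) (min_len : Int), Dom_find_common_slot_py day_intervals min_len → Pre_find_common_slot_py day_intervals min_len → Spec_find_common_slot_py day_intervals min_len (find_common_slot_py day_intervals min_len)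

-- ===== LEMMAS AND PROOFS =====

-- pvB_intersect returns the accumulator when either stack is empty.
theorem pvB_nil_right (xs out : List (Int × Int)) : pvB_intersect xs [] out = out := by
  rcases xs with _ | ⟨⟨u, v⟩, t⟩ <;> rw [pvB_intersect.eq_def]

theorem pvB_nil_left (ys out : List (Int × Int)) : pvB_intersect [] ys out = out := by
  rcases ys with _ | ⟨⟨u, v⟩, t⟩ <;> rw [pvB_intersect.eq_def]

-- A's index loop equals B's head-consuming loop on the dropped suffixes.
theorem interLoop_eq_intersect (inter nxt : List (Int × Int)) (i j : Nat)
    (acc : List (Int × Int)) :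
    pvA_interLoop inter nxt i j acc = pvB_intersect (inter.drop i) (nxt.drop j) acc := by
  fun_induction pvA_interLoop inter nxt i j acc with
  | case1 i j acc h a b start stop acc' hlt ih =>
      rw [List.drop_eq_getElem_cons h.1, List.drop_eq_getElem_cons h.2]
      rw [pvB_intersect]
      rw [if_pos hlt, ih, List.drop_eq_getElem_cons h.2]
      simp only [Prod.mk.eta]
      rfl
  | case2 i j acc h a b start stop acc' hlt ih =>
      rw [List.drop_eq_getElem_cons h.1, List.drop_eq_getElem_cons h.2]
      rw [pvB_intersect]
      rw [if_neg hlt, ih, List.drop_eq_getElem_cons h.1]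
      simp only [Prod.mk.eta]
      rfl
  | case3 i j acc h =>
      rcases Nat.lt_or_ge i inter.length with hi | hi
      · have hj : nxt.length ≤ j := by omega
        rw [List.drop_eq_nil_of_le hj, pvB_nil_right]
      · rw [List.drop_eq_nil_of_le hi, pvB_nil_left]

-- the empty intersection is absorbing for B's fold
theorem foldl_nil_absorb (rest : List (List (Int × Int))) :
    rest.foldl (fun acc nxt => pvB_intersect acc nxt []) [] = [] := by
  induction rest with
  | nil => rfl
  | cons nxt rest ih => simp only [List.foldl_cons, pvB_nil_left]; exact ih

-- A's final scan equals B's find?-based selection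
theorem pick_eq_find (min_len : Int) (l : List (Int × Int)) :
    pvA_pick min_len l
      = (l.find? (fun p => p.2 - p.1 ≥ min_len)).map (fun p => (p.1, p.1 + min_len)) := by
  induction l with
  | nil => rfl
  | cons p t ih =>
      obtain ⟨s, e⟩ := p
      by_cases hc : e - s ≥ min_len
      · simp [pvA_pick, List.find?, hc]
      · simp [pvA_pick, List.find?, hc, ih]

-- A's early-exit outer loop plus final scan equals B's fold plus find?
theorem outer_eq_fold (rest : List (List (Int × Int))) (inter : List (Int × Int))
    (min_len : Int) :
    (match pvA_outer inter rest with
      | none => none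
      | some l => pvA_pick min_len l)
      = ((rest.foldl (fun acc nxt => pvB_intersect acc nxt []) inter).find?
          (fun p => p.2 - p.1 ≥ min_len)).map (fun p => (p.1, p.1 + min_len)) := by
  induction rest generalizing inter with
  | nil => exact pick_eq_find min_len inter
  | cons nxt rest ih =>
      simp only [pvA_outer, List.foldl_cons]
      rw [interLoop_eq_intersect inter nxt 0 0 []]
      simp only [List.drop_zero]
      by_cases he : pvB_intersect inter nxt [] = []
      · rw [if_pos he, he, foldl_nil_absorb]
        rfl
      · rw [if_neg he]
        exact ih (pvB_intersect inter nxt [])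

-- ===== VERDICT (by name: the statement is the Claim_ definition above) =====
theorem find_common_slot_py_spec : Claim_equal_find_common_slot_py := by
  intro day_intervals min_len _ hpre
  unfold Spec_find_common_slot_py
  match day_intervals with
  | [] => exact absurd rfl hpre
  | first :: rest =>
      simp only [find_common_slot_py, find_common_slot_py_alt]
      exact outer_eq_fold rest first min_len
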